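-- pv_equiv track=rewrite | github.com/Dulal13/python-practice | Edabit_code/day-13/04_spain_around.py | spin_around
-- ===== SOURCE A (Python) =====
-- def spin_around(lst):
--     rotation = 0
--     if lst[0] == "right":
--
--         for item in lst:
--             if item=="right":
--                 rotation += 90
--             else:
--                 rotation -= 90
--     elif(lst[0] == "left"):
--
--         for item in lst:
--             if item=="left":
--                 rotation += 90
--             else:
--                 rotation -= 90
--     else:
--         return 0
--     return abs(rotation)//360
-- ===== SOURCE B (Python) =====
-- def spin_around(lst):
--     head = lst[0]
--     if head != "right" and head != "left":
--         return 0
--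
--     # Divide-and-conquer: count net quarter-turns on lst[lo:hi] by splitting
--     # the range in half and summing the two halves (depth O(log n)).
--     def quarters(lo, hi):
--         if hi - lo == 1:
--             return 1 if lst[lo] == head else -1
--         mid = (lo + hi) // 2
--         return quarters(lo, mid) + quarters(mid, hi)
--
--     return abs(quarters(0, len(lst))) // 4
-- ===== Notes on version B (the rewrite author's own statement) =====
-- stated objective: alternative
-- what changed: Replaced A's linear accumulating loop over degrees by a divide-and-conquer recursion over index ranges that sums net quarter-turns (+1/-1) from two halves, converting to full rotations with abs(q)//4 instead of abs(90*q)//360.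
import Mathlib
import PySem

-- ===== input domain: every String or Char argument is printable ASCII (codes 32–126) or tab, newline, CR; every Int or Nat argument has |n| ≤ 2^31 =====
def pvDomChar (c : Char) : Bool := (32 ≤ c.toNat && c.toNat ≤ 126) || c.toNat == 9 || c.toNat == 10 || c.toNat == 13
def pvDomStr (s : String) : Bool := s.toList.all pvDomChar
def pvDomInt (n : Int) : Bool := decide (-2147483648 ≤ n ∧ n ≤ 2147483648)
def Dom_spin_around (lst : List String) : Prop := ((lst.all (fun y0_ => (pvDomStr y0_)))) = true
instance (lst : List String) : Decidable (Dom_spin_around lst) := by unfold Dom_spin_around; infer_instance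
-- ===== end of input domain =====

-- B replaces A's accumulating degree loop by a divide-and-conquer sum of quarter-turns over index ranges (objective: alternative).
-- ===== PORT A =====
def spin_around (lst : List String) : Int :=
  match PySem.List.pyGet? lst 0 with
  | none => 0  -- unreachable under Pre_ (Python raises IndexError on empty lst)
  | some h =>
    if h = "right" then
      PySem.Int.floordiv
        |lst.foldl (fun rotation item => if item = "right" then rotation + 90 else rotation - 90) 0| 360
    else if h = "left" then
      PySem.Int.floordiv
        |lst.foldl (fun rotation item => if item = "left" then rotation + 90 else rotation - 90) 0| 360
    else 0

-- ===== PORT B =====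
-- B's recursive helper 'quarters(lo, hi)': net quarter-turns on lst[lo:hi], by halving the range.
-- Structural recursion on a fuel = range size (a totality guard only: each call halves the range,
-- so fuel = hi - lo always suffices; Python only calls it with lo < hi ≤ len(lst)).
def quartersB (lst : List String) (head : String) (fuel lo hi : Nat) : Int :=
  match fuel with
  | 0 => 0  -- unreachable totality guard (fuel ≥ hi - lo at every call)
  | fuel + 1 =>
    if hi - lo = 1 then
      -- lst[lo] with a valid index: pyGet? is some here
      (if (PySem.List.pyGet? lst (lo : Int)).getD "" = head then 1 else -1)
    else
      let mid := (lo + hi) / 2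
      quartersB lst head fuel lo mid + quartersB lst head fuel mid hi

def spin_around_alt (lst : List String) : Int :=
  match PySem.List.pyGet? lst 0 with
  | none => 0  -- unreachable under Pre_ (Python raises IndexError on empty lst)
  | some head =>
    if head ≠ "right" ∧ head ≠ "left" then 0
    else PySem.Int.floordiv |quartersB lst head lst.length 0 lst.length| 4

-- ===== PRECONDITION & SPEC =====
-- Pre_ excludes only the empty list, on which both A and B raise IndexError at lst[0].
def Pre_spin_around (lst : List String) : Prop := lst ≠ []
instance (lst : List String) : Decidable (Pre_spin_around lst) := by unfold Pre_spin_around; infer_instance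
def pvWitness_spin_around : List String := (["right", "left", "right"])
def Spec_spin_around (lst : List String) (out : Int) : Prop := out = spin_around_alt lst
instance (lst : List String) (out : Int) : Decidable (Spec_spin_around lst out) := by unfold Spec_spin_around; infer_instance

-- ===== CLAIM (what is proved, stated in full; the proofs are below) =====
def Claim_equal_spin_around : Prop := ∀ (lst : List String), Dom_spin_around lst → Pre_spin_around lst → Spec_spin_around lst (spin_around lst)

-- ===== LEMMAS AND PROOFS =====
-- A's loop computes 90 * (2*count - length).
theorem spin_foldl (d : String) (lst : List String) (r : Int) :
    lst.foldl (fun rotation item => if item = d then rotation + 90 else rotation - 90) r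
      = r + 90 * (2 * (lst.count d : Int) - lst.length) := by
  induction lst generalizing r with
  | nil => simp
  | cons a t ih =>
    simp only [List.foldl_cons, ih, List.count_cons, List.length_cons]
    by_cases h : a = d <;> simp [h] <;> ring

-- splitting a slice at an interior point
theorem take_drop_split (lst : List String) (lo mid hi : Nat) (h1 : lo ≤ mid) (h2 : mid ≤ hi) :
    (lst.drop lo).take (hi - lo)
      = (lst.drop lo).take (mid - lo) ++ (lst.drop mid).take (hi - mid) := by
  rw [show hi - lo = (mid - lo) + (hi - mid) from by omega, List.take_add]
  congr 2
  rw [List.drop_drop]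
  congr 1
  omega

-- quartersB on a valid range [lo, hi) with enough fuel computes 2*count(slice) - (hi - lo).
theorem quartersB_eq (lst : List String) (head : String) (fuel lo hi : Nat)
    (hf : hi - lo ≤ fuel) (hlo : lo < hi) (hhi : hi ≤ lst.length) :
    quartersB lst head fuel lo hi
      = 2 * (((lst.drop lo).take (hi - lo)).count head : Int) - (hi - lo : Nat) := by
  induction fuel generalizing lo hi with
  | zero => omega
  | succ fuel ih => ?_
  rw [quartersB]
  by_cases h1 : hi - lo = 1
  · have hx : lo < lst.length := by omega
    simp only [h1]
    have hpg : PySem.List.pyGet? lst (lo : Int) = some lst[lo] := by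
      simp [PySem.List.pyGet?, PySem.List.pyIdx?, hx]
    rw [hpg]
    have htake : (lst.drop lo).take 1 = [lst[lo]] := by
      have h0 : (lst.drop lo)[0]? = some lst[lo] := by
        rw [List.getElem?_drop]; simp [hx]
      cases hd : lst.drop lo with
      | nil => rw [hd] at h0; simp at h0
      | cons b u => rw [hd] at h0; simp at h0; simp [h0]
    rw [htake]
    by_cases h : lst[lo] = head <;> simp [h]
  · have h2 : 2 ≤ hi - lo := by omega
    set mid := (lo + hi) / 2 with hmid
    have hm1 : lo < mid := by omega
    have hm2 : mid < hi := by omega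
    simp only [if_neg h1]
    rw [ih lo mid (by omega) hm1 (by omega), ih mid hi (by omega) hm2 hhi]
    rw [take_drop_split lst lo mid hi (by omega) (by omega), List.count_append]
    push_cast
    omega

-- unit change: abs(90*q)//360 = abs(q)//4
theorem units (q : Int) : PySem.Int.floordiv |90 * q| 360 = PySem.Int.floordiv |q| 4 := by
  rw [abs_mul]
  rw [PySem.Int.floordiv_eq_ediv_of_pos (by norm_num), PySem.Int.floordiv_eq_ediv_of_pos (by norm_num)]
  have : |(90 : Int)| = 90 := by norm_num
  rw [this, show (360 : Int) = 90 * 4 by norm_num, Int.mul_ediv_mul_of_pos _ _ (by norm_num)]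

-- ===== VERDICT (by name: the statement is the Claim_ definition above) =====
theorem spin_around_spec : Claim_equal_spin_around := by
  intro lst _ hpre
  unfold Spec_spin_around spin_around spin_around_alt
  match lst, hpre with
  | a :: t, _ =>
    have hg : PySem.List.pyGet? (a :: t) (0 : Int) = some a := by
      simp [PySem.List.pyGet?, PySem.List.pyIdx?]
    simp only [hg]
    have hq := quartersB_eq (a :: t) a (a :: t).length 0 (a :: t).length (by omega) (by simp) (le_refl _)
    simp only [Nat.sub_zero, List.drop_zero, List.take_length] at hq
    by_cases hr : a = "right"
    · subst hr
      rw [if_pos rfl, if_neg (by simp)]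
      rw [spin_foldl, zero_add, units, hq]
    · by_cases hl : a = "left"
      · subst hl
        rw [if_neg (by decide), if_pos rfl, if_neg (by simp)]
        rw [spin_foldl, zero_add, units, hq]
      · rw [if_neg hr, if_neg hl, if_pos ⟨hr, hl⟩]
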